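-- pv_equiv track=rewrite | github.com/57459N/nesting | packing_methods/burke.py | _find_lowest_plato
-- ===== SOURCE A (Python) =====
-- def _find_lowest_plato(levels: list[int]) -> (int, float):
--     # returns index of beginning of plato and its width
--
--     lowest_level = min(levels)
--     cur_len = 0
--     max_len = 0
--     cur_start_pos = None
--     max_len_start_pos = None
--
--     for i, level in enumerate(levels):
--         if level == lowest_level:
--             if cur_len == 0:
--                 cur_start_pos = i
--             cur_len += 1
--         else:
--             if cur_len > max_len:
--                 max_len = cur_len
--                 max_len_start_pos = cur_start_pos
--             cur_len = 0
--
--         if cur_len > max_len: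
--             max_len = cur_len
--             max_len_start_pos = cur_start_pos
--
--     return max_len_start_pos, max_len
-- ===== SOURCE B (Python) =====
-- def _find_lowest_plato(levels: list[int]) -> (int, float):
--     # Different decomposition: build the run-length scan array (run[i] = length of
--     # the block of `lowest` values ending at i), then extract the answer with
--     # max() + list.index(): the first occurrence of the maximum is the end of the
--     # earliest longest plateau.
--     lowest = min(levels)
--     run = []
--     prev = 0
--     for x in levels:
--         prev = prev + 1 if x == lowest else 0
--         run.append(prev)
--     best = max(run)
--     end = run.index(best)
--     return end - best + 1, best
-- ===== Notes on version B (the rewrite author's own statement) =====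
-- stated objective: alternative
-- what changed: Replaces A's four-variable state machine (current/maximal run with start bookkeeping) by a run-length scan array run[i] = length of the block of minimal values ending at i, from which the answer is read off with max() and list.index() (first occurrence of the maximum = end of the earliest longest plateau).
-- outside the precondition, e.g. on _find_lowest_plato([]): A raises ValueError, B raises ValueError
import Mathlib
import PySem

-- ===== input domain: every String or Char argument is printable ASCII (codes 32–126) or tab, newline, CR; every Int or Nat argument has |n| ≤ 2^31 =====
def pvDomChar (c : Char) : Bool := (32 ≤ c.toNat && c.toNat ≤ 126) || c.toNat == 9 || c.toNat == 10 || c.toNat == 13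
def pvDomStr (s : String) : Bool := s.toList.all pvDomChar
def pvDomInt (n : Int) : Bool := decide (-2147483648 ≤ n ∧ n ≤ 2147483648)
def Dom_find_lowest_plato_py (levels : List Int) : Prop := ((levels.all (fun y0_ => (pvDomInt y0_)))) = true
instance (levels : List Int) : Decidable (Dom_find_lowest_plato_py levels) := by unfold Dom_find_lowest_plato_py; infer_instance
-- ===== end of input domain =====

-- B replaces A's explicit run/best state machine by a run-length scan array plus max()+index() extraction; equal return value on every non-empty list (equivalence is about the return value only).

-- ===== PORT A =====
-- loop body of A, step for step; state = (cur_len, max_len, cur_start_pos, max_len_start_pos)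
def stepA (lowest : Int) (st : Int × Int × Option Int × Option Int) (p : Int × Int) :
    Int × Int × Option Int × Option Int :=
  let (curLen, maxLen, curStart, maxStart) := st
  let st1 : Int × Int × Option Int × Option Int :=
    if p.2 = lowest then
      let curStart' := if curLen = 0 then some p.1 else curStart
      (curLen + 1, maxLen, curStart', maxStart)
    else
      if curLen > maxLen then (0, curLen, curStart, curStart)
      else (0, maxLen, curStart, maxStart)
  if st1.1 > st1.2.1 then (st1.1, st1.1, st1.2.2.1, st1.2.2.1) else st1

def find_lowest_plato_py (levels : List Int) : Int × Int :=
  match PySem.List.min? levels (fun y => y) with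
  | none => (0, 0)  -- min([]) raises ValueError; excluded by Pre_
  | some lowest =>
    let s := (PySem.List.enumerate levels).foldl (stepA lowest) (0, 0, none, none)
    -- on every non-empty list max_len_start_pos is an int; `.getD 0` is never reached under Pre_
    (s.2.2.2.getD 0, s.2.1)

-- ===== PORT B =====
def find_lowest_plato_py_alt (levels : List Int) : Int × Int :=
  match PySem.List.min? levels (fun y => y) with
  | none => (0, 0)  -- min([]) raises ValueError; excluded by Pre_
  | some lowest =>
    let run := (levels.foldl (fun (acc : List Int × Int) x =>
        let prev := if x = lowest then acc.2 + 1 else 0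
        (acc.1 ++ [prev], prev)) ([], 0)).1
    match PySem.List.max? run (fun y => y) with
    | none => (0, 0)      -- unreachable: run is non-empty whenever levels is
    | some best =>
      match PySem.List.index? run best with
      | none => (0, 0)    -- unreachable: best ∈ run
      | some e => ((e : Int) - best + 1, best)

-- ===== PRECONDITION & SPEC =====
-- Pre_ excludes exactly the empty list, on which Python's min([]) raises ValueError (in A and in B alike).
def Pre_find_lowest_plato_py (levels : List Int) : Prop := levels ≠ []
instance (levels : List Int) : Decidable (Pre_find_lowest_plato_py levels) := by unfold Pre_find_lowest_plato_py; infer_instance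
def pvWitness_find_lowest_plato_py : List Int := [3, 1, 1, 2, 1]

def Spec_find_lowest_plato_py (levels : List Int) (out : Int × Int) : Prop := out = find_lowest_plato_py_alt levels
instance (levels : List Int) (out : Int × Int) : Decidable (Spec_find_lowest_plato_py levels out) := by unfold Spec_find_lowest_plato_py; infer_instance

-- ===== CLAIM (what is proved, stated in full; the proofs are below) =====
def Claim_equal_find_lowest_plato_py : Prop := ∀ (levels : List Int), Dom_find_lowest_plato_py levels → Pre_find_lowest_plato_py levels → Spec_find_lowest_plato_py levels (find_lowest_plato_py levels)

-- ===== LEMMAS AND PROOFS =====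

def runsAux (l : Int) (prev : Int) : List Int → List Int
  | [] => []
  | x :: xs => let p := if x = l then prev + 1 else 0
               p :: runsAux l p xs

def mach (i : Nat) (maxLen : Int) (maxStart : Option Int) : List Int → Int × Option Int
  | [] => (maxLen, maxStart)
  | r :: rs => mach (i + 1) (max maxLen r)
      (if r > maxLen then some ((i : Int) - r + 1) else maxStart) rs

theorem runsAux_nonneg (l : Int) : ∀ (xs : List Int) (prev : Int), 0 ≤ prev →
    ∀ r ∈ runsAux l prev xs, 0 ≤ r := by
  intro xs
  induction xs with
  | nil => intro prev _ r hr; simp [runsAux] at hr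
  | cons x xs ih =>
    intro prev hp r hr
    simp only [runsAux, List.mem_cons] at hr
    rcases hr with rfl | h
    · split <;> omega
    · exact ih _ (by split <;> omega) r h

theorem runsAux_pos_of_mem (l : Int) : ∀ (xs : List Int) (prev : Int), 0 ≤ prev → l ∈ xs →
    ∃ r ∈ runsAux l prev xs, 1 ≤ r := by
  intro xs
  induction xs with
  | nil => intro _ _ h; simp at h
  | cons x xs ih =>
    intro prev hp hmem
    by_cases hx : x = l
    · exact ⟨prev + 1, by simp [runsAux, hx], by omega⟩
    · have hl : l ∈ xs := by
        rcases List.mem_cons.1 hmem with h | h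
        · exact absurd h.symm hx
        · exact h
      obtain ⟨r, hr, h1⟩ := ih 0 le_rfl hl
      exact ⟨r, by simp [runsAux, hx, hr], h1⟩

theorem foldl_run (l : Int) : ∀ (xs : List Int) (acc : List Int) (prev : Int),
    (xs.foldl (fun (acc : List Int × Int) x =>
        let p := if x = l then acc.2 + 1 else 0
        (acc.1 ++ [p], p)) (acc, prev)).1 = acc ++ runsAux l prev xs := by
  intro xs
  induction xs with
  | nil => intro acc prev; simp [runsAux]
  | cons x xs ih =>
    intro acc prev
    simp only [List.foldl_cons, runsAux]
    rw [ih]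
    simp

theorem loopA (lowest : Int) : ∀ (xs : List Int) (i : Nat) (curLen maxLen : Int)
    (curStart maxStart : Option Int),
    0 ≤ curLen → curLen ≤ maxLen →
    (0 < curLen → curStart = some ((i : Int) - curLen)) →
    (((PySem.List.enumerate xs (i : Int)).foldl (stepA lowest)
        (curLen, maxLen, curStart, maxStart)).2.1,
     ((PySem.List.enumerate xs (i : Int)).foldl (stepA lowest)
        (curLen, maxLen, curStart, maxStart)).2.2.2)
      = mach i maxLen maxStart (runsAux lowest curLen xs) := by
  intro xs
  induction xs with
  | nil => intro i curLen maxLen curStart maxStart _ _ _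
           simp [PySem.List.enumerate_nil, mach, runsAux]
  | cons x xs ih =>
    intro i curLen maxLen curStart maxStart h0 hle hcs
    rw [PySem.List.enumerate_cons, List.foldl_cons]
    have hca : ((i : Int) + 1) = ((i + 1 : Nat) : Int) := by push_cast; ring
    by_cases hx : x = lowest
    · have hstep : stepA lowest (curLen, maxLen, curStart, maxStart) ((i : Int), x) =
          (curLen + 1, max maxLen (curLen + 1),
           some ((i : Int) - (curLen + 1) + 1),
           if curLen + 1 > maxLen then some ((i : Int) - (curLen + 1) + 1) else maxStart) := by
        by_cases h1 : curLen = 0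
        · subst h1
          by_cases h2 : maxLen < (1 : Int) <;>
            simp [stepA, hx, h2, Prod.ext_iff] <;> omega
        · have hpos : 0 < curLen := by omega
          rw [hcs hpos] at *
          by_cases h2 : curLen + 1 > maxLen <;>
            simp [stepA, hx, h1, h2, Prod.ext_iff] <;>
            constructor <;> omega
      rw [hstep, hca,
        ih (i + 1) (curLen + 1) (max maxLen (curLen + 1)) _ _ (by omega) (by omega)
          (by intro _; congr 1; push_cast; ring)]
      simp [runsAux, hx, mach]
    · have hstep : stepA lowest (curLen, maxLen, curStart, maxStart) ((i : Int), x) =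
          (0, maxLen, curStart, maxStart) := by
        have h2 : ¬ curLen > maxLen := by omega
        have h3 : ¬ (0 : Int) > maxLen := by omega
        simp [stepA, hx, h2, h3]
      rw [hstep, hca, ih (i + 1) 0 maxLen curStart maxStart le_rfl (by omega) (by omega)]
      simp only [runsAux, hx, mach]
      have h4 : ¬ (0 : Int) > maxLen := by omega
      have h5 : max maxLen (0 : Int) = maxLen := by omega
      simp [h4, h5]

theorem mach_fst : ∀ (rs : List Int) (i : Nat) (m : Int) (ms : Option Int),
    (mach i m ms rs).1 = rs.foldl max m := by
  intro rs
  induction rs with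
  | nil => intro i m ms; simp [mach]
  | cons r rs ih => intro i m ms; simp [mach, List.foldl_cons, ih]

theorem mach_keep : ∀ (rs : List Int) (i : Nat) (m : Int) (ms : Option Int),
    (∀ r ∈ rs, r ≤ m) → (mach i m ms rs).2 = ms := by
  intro rs
  induction rs with
  | nil => intro i m ms _; simp [mach]
  | cons r rs ih =>
    intro i m ms h
    have hr : r ≤ m := h r (by simp)
    have h1 : ¬ r > m := by omega
    have h2 : max m r = m := by omega
    simp only [mach, if_neg h1, h2]
    exact ih _ _ _ (fun r' hr' => h r' (by simp [hr']))

theorem mach_snd : ∀ (rs : List Int) (i : Nat) (m : Int) (ms : Option Int) (best : Int) (e : Nat),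
    rs.foldl max m = best → m < best → PySem.List.index? rs best = some e →
    (mach i m ms rs).2 = some ((i : Int) + e - best + 1) := by
  intro rs
  induction rs with
  | nil => intro i m ms best e hb hm _; simp at hb; omega
  | cons r rs ih =>
    intro i m ms best e hb hm hidx
    rw [List.foldl_cons] at hb
    have hmem : ∀ y ∈ rs, y ≤ rs.foldl max (max m r) := (PySem.List.le_foldl_max rs (max m r)).2
    have hself : max m r ≤ rs.foldl max (max m r) := (PySem.List.le_foldl_max rs (max m r)).1
    by_cases hr : r = best
    · subst hr
      rw [PySem.List.index?_cons_self] at hidx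
      have he0 : e = 0 := (Option.some_inj.1 hidx).symm
      subst he0
      have hmax : max m r = r := by omega
      rw [hmax] at hb hmem
      simp only [mach, if_pos hm, hmax]
      rw [mach_keep rs _ r _ (by intro y hy; exact hb ▸ hmem y hy)]
      norm_num
    · rw [PySem.List.index?_cons_of_ne rs hr] at hidx
      rcases Option.map_eq_some_iff.1 hidx with ⟨e', he', hee⟩
      have hrle : r ≤ best := by
        have : max m r ≤ best := hb ▸ hself
        omega
      have hm' : max m r < best := by
        rcases lt_or_eq_of_le hrle with h | h
        · omega
        · exact absurd h hr
      simp only [mach]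
      rw [ih (i + 1) (max m r) _ best e' hb hm' he']
      congr 1
      subst hee
      push_cast
      ring

theorem runsAux_ne_nil (l prev : Int) (x : Int) (xs : List Int) :
    runsAux l prev (x :: xs) ≠ [] := by
  simp [runsAux]

theorem main_eq (x : Int) (xs : List Int) :
    find_lowest_plato_py (x :: xs) = find_lowest_plato_py_alt (x :: xs) := by
  have hlmem : List.foldl min x xs ∈ x :: xs := by
    rcases PySem.List.foldl_min_mem xs x with h1 | h1
    · rw [h1]; simp
    · simp [h1]
  obtain ⟨r0, rs0, hr0⟩ :=
    List.exists_cons_of_ne_nil (runsAux_ne_nil (List.foldl min x xs) 0 x xs)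
  have hr0nn : (0 : Int) ≤ r0 :=
    runsAux_nonneg _ (x :: xs) 0 le_rfl r0 (by rw [hr0]; simp)
  have hfold : (runsAux (List.foldl min x xs) 0 (x :: xs)).foldl max 0 = rs0.foldl max r0 := by
    rw [hr0, List.foldl_cons]
    have : max (0 : Int) r0 = r0 := by omega
    rw [this]
  have hbest1 : 1 ≤ rs0.foldl max r0 := by
    obtain ⟨r, hr, h1⟩ := runsAux_pos_of_mem _ (x :: xs) 0 le_rfl hlmem
    rw [hr0, List.mem_cons] at hr
    rcases hr with rfl | h2
    · exact le_trans h1 (PySem.List.le_foldl_max rs0 r).1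
    · exact le_trans h1 ((PySem.List.le_foldl_max rs0 r0).2 r h2)
  have hbmem : rs0.foldl max r0 ∈ runsAux (List.foldl min x xs) 0 (x :: xs) := by
    rw [hr0]
    rcases PySem.List.foldl_max_mem rs0 r0 with h1 | h1
    · rw [h1]; simp
    · simp [h1]
  obtain ⟨e, he⟩ := Option.isSome_iff_exists.1
    ((PySem.List.index?_isSome_iff _ _).2 hbmem)
  -- A's side
  have hA : find_lowest_plato_py (x :: xs) = ((e : Int) - rs0.foldl max r0 + 1, rs0.foldl max r0) := by
    unfold find_lowest_plato_py
    rw [PySem.List.min?_id_cons]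
    simp only
    have hl := loopA (List.foldl min x xs) (x :: xs) 0 0 0 none none le_rfl le_rfl (by omega)
    rw [Nat.cast_zero] at hl
    have h1 := congrArg Prod.fst hl
    have h2 := congrArg Prod.snd hl
    simp only at h1 h2
    rw [h1, h2, mach_fst, hfold,
      mach_snd _ 0 0 none (rs0.foldl max r0) e hfold (by omega) he]
    simp only [Option.getD_some, Nat.cast_zero]
    congr 1
    ring
  -- B's side
  have hB : find_lowest_plato_py_alt (x :: xs) = ((e : Int) - rs0.foldl max r0 + 1, rs0.foldl max r0) := by
    unfold find_lowest_plato_py_alt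
    rw [PySem.List.min?_id_cons]
    simp only
    rw [foldl_run (List.foldl min x xs) (x :: xs) [] 0, List.nil_append, hr0,
      PySem.List.max?_id_cons]
    simp only
    rw [← hr0, he]
  rw [hA, hB]

-- ===== VERDICT (by name: the statement is the Claim_ definition above) =====
theorem find_lowest_plato_py_spec : Claim_equal_find_lowest_plato_py := by
  intro levels _ hpre
  obtain ⟨x, xs, rfl⟩ := List.exists_cons_of_ne_nil hpre
  unfold Spec_find_lowest_plato_py
  exact main_eq x xs
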